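-- pv_equiv track=rewrite | github.com/theri6v/CodeSprintSolutions | GeekForGeek/Problem Of The Day/Balancing Consonants and Vowels Ratio.py | countBalanced
-- ===== SOURCE A (Python) =====
-- def countBalanced(arr):
--     # code here
--     n = len(arr)
--     d = {0: 1}
--     s = 0
--     nums = []
--     for i in arr:
--         v, c = 0, 0
--         for j in i:
--             if j in 'aeiou':
--                 v += 1
--             else:
--                 c += 1
--         nums.append(v - c)
--     cnt = 0
--     for i in nums:
--         s += i
--         rem = s - 0
--         if rem in d:
--             cnt += d[rem]
--         if s not in d:
--             d[s] = 1
--         else: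
--             d[s] += 1
--     return cnt
-- ===== SOURCE B (Python) =====
-- def countBalanced(arr):
--     nums = []
--     for i in arr:
--         v, c = 0, 0
--         for j in i:
--             if j in 'aeiou':
--                 v += 1
--             else:
--                 c += 1
--         nums.append(v - c)
--     prefix = [0]
--     s = 0
--     for x in nums:
--         s += x
--         prefix.append(s)
--     freq = {}
--     for p in prefix:
--         freq[p] = freq.get(p, 0) + 1
--     total = 0
--     for c in freq.values():
--         total += c * (c - 1) // 2
--     return total
-- ===== Notes on version B (the rewrite author's own statement) =====
-- stated objective: alternative
-- what changed: Instead of counting matches incrementally while streaming (cnt += d[s] at each step), B builds the full prefix-sum table (starting with 0), tallies it into a frequency dict in one pass, and then sums count*(count-1)//2 over the histogram.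
import Mathlib
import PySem

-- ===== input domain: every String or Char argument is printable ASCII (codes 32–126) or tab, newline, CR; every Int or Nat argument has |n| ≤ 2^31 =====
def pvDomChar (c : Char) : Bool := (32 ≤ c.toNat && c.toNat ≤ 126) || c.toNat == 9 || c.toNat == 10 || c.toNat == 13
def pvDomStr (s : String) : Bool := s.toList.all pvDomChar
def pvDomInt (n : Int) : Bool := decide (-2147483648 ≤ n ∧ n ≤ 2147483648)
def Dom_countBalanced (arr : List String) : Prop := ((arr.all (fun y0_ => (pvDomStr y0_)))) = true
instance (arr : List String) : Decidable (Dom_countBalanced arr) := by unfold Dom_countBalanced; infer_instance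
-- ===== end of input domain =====

-- B replaces A's incremental match counting with a prefix-sum table, a histogram and a
-- combinatorial count*(count-1)//2 pass; structurally different, same asymptotic cost.

-- ===== PORT A =====
-- vowels-minus-consonants score of one string (A's inner loop; 'j in "aeiou"' on a single
-- char is exactly char membership in ['a','e','i','o','u'])
def pvScoreA (i : String) : Int :=
  let vc := i.toList.foldl
    (fun (p : Int × Int) j =>
      if j ∈ ['a', 'e', 'i', 'o', 'u'] then (p.1 + 1, p.2) else (p.1, p.2 + 1))
    (0, 0)
  vc.1 - vc.2

-- A's counting loop body: s += i; rem = s - 0; cnt += d[rem] if rem in d; d[s] += 1 / d[s] = 1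
def pvStepA (st : Int × PySem.Dict Int Int × Int) (i : Int) : Int × PySem.Dict Int Int × Int :=
  let s := st.1 + i
  let d := st.2.1
  let cnt := st.2.2
  let rem := s - 0
  let cnt := if d.contains rem then cnt + d.getD rem 0 else cnt
  let d := if d.contains s = false then d.insert s 1 else d.modify s 0 (· + 1)
  (s, d, cnt)

def countBalanced (arr : List String) : Int :=
  let nums := arr.foldl (fun ns i => ns ++ [pvScoreA i]) []
  let st := nums.foldl pvStepA (0, PySem.Dict.ofList [((0 : Int), (1 : Int))], 0)
  st.2.2

-- ===== PORT B =====
-- same vowel scan as A's first loop (Source B keeps it verbatim)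
def pvScoreB (i : String) : Int :=
  let vc := i.toList.foldl
    (fun (p : Int × Int) j =>
      if j ∈ ['a', 'e', 'i', 'o', 'u'] then (p.1 + 1, p.2) else (p.1, p.2 + 1))
    (0, 0)
  vc.1 - vc.2

def countBalanced_alt (arr : List String) : Int :=
  let nums := arr.foldl (fun ns i => ns ++ [pvScoreB i]) []
  -- prefix = [0]; for x in nums: s += x; prefix.append(s)
  let pr := nums.foldl (fun (p : List Int × Int) x => (p.1 ++ [p.2 + x], p.2 + x)) ([0], 0)
  let prefixList := pr.1
  -- freq = {}; for p in prefix: freq[p] = freq.get(p, 0) + 1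
  let freq := prefixList.foldl (fun d p => d.insert p (d.getD p 0 + 1)) PySem.Dict.empty
  -- total = 0; for c in freq.values(): total += c * (c - 1) // 2
  freq.values.foldl (fun t c => t + PySem.Int.floordiv (c * (c - 1)) 2) 0

-- ===== PRECONDITION & SPEC =====
def Spec_countBalanced (arr : List String) (out : Int) : Prop := out = countBalanced_alt arr
instance (arr : List String) (out : Int) : Decidable (Spec_countBalanced arr out) := by unfold Spec_countBalanced; infer_instance

-- ===== CLAIM (what is proved, stated in full; the proofs are below) =====
def Claim_equal_countBalanced : Prop := ∀ (arr : List String), Dom_countBalanced arr → Spec_countBalanced arr (countBalanced arr)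

-- ===== LEMMAS AND PROOFS =====

-- the list of running prefix sums of l starting from s (s itself excluded)
def pvPrefixes (s : Int) : List Int → List Int
  | [] => []
  | x :: l => (s + x) :: pvPrefixes (s + x) l

-- c*(c-1)//2 as B computes it
def pvC2 (c : Int) : Int := PySem.Int.floordiv (c * (c - 1)) 2

-- B's final value as a function of the prefix list
def pvG (P : List Int) : Int :=
  ((PySem.Set.ofList P).map (fun k => pvC2 ((P.count k : Int)))).sum

theorem pvC2_succ (n : Nat) : pvC2 ((n : Int) + 1) = pvC2 (n : Int) + n := by
  unfold pvC2
  rw [PySem.Int.floordiv_eq_ediv_of_pos (by omega), PySem.Int.floordiv_eq_ediv_of_pos (by omega)]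
  have h : ((n : Int) + 1) * ((n : Int) + 1 - 1) = (n : Int) * ((n : Int) - 1) + 2 * n := by ring
  rw [h]
  omega

-- sum over a nodup list of a function that changes at exactly one member
theorem pvSum_update (S : List Int) (x : Int) (f f' : Int → Int)
    (hnd : S.Nodup) (hx : x ∈ S) (hagree : ∀ k ∈ S, k ≠ x → f' k = f k) :
    (S.map f').sum = (S.map f).sum + (f' x - f x) := by
  induction S with
  | nil => cases hx
  | cons a S ih =>
    rcases List.mem_cons.mp hx with rfl | hmem
    · have : ∀ k ∈ S, f' k = f k := by
        intro k hk
        exact hagree k (List.mem_cons_of_mem _ hk) (by rintro rfl; exact (List.nodup_cons.mp hnd).1 hk)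
      simp [List.map_congr_left this]; ring
    · have hax : a ≠ x := by rintro rfl; exact (List.nodup_cons.mp hnd).1 hmem
      have := ih (List.nodup_cons.mp hnd).2 hmem
        (fun k hk hne => hagree k (List.mem_cons_of_mem _ hk) hne)
      simp [this, hagree a (List.mem_cons_self) hax]; ring

theorem pvSet_ofList_append_mem (P : List Int) (x : Int) (hx : x ∈ P) :
    PySem.Set.ofList (P ++ [x]) = PySem.Set.ofList P := by
  unfold PySem.Set.ofList
  rw [List.foldl_append]
  exact PySem.Set.add_of_mem ((PySem.Set.mem_ofList P x).mpr hx)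

theorem pvSet_ofList_append_not_mem (P : List Int) (x : Int) (hx : x ∉ P) :
    PySem.Set.ofList (P ++ [x]) = PySem.Set.ofList P ++ [x] := by
  unfold PySem.Set.ofList
  rw [List.foldl_append]
  exact PySem.Set.add_of_not_mem (fun h => hx ((PySem.Set.mem_ofList P x).mp h))

-- the one-step recurrence of B's combinatorial count
theorem pvG_append (P : List Int) (x : Int) : pvG (P ++ [x]) = pvG P + P.count x := by
  by_cases hx : x ∈ P
  · unfold pvG
    rw [pvSet_ofList_append_mem P x hx]
    rw [pvSum_update (PySem.Set.ofList P) x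
      (fun k => pvC2 ((P.count k : Int))) (fun k => pvC2 (((P ++ [x]).count k : Int)))
      (PySem.Set.nodup_ofList P) ((PySem.Set.mem_ofList P x).mpr hx)
      (by intro k _ hk; simp [List.count_append, Ne.symm hk])]
    have hcx : (((P ++ [x]).count x : Int)) = (P.count x : Int) + 1 := by
      simp [List.count_append]
    rw [hcx, pvC2_succ]
    ring
  · have hc0 : P.count x = 0 := List.count_eq_zero.mpr hx
    have hagree : ∀ k ∈ PySem.Set.ofList P,
        pvC2 (((P ++ [x]).count k : Int)) = pvC2 ((P.count k : Int)) := by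
      intro k hk
      have hkP : k ∈ P := (PySem.Set.mem_ofList P k).mp hk
      have hne : x ≠ k := by rintro rfl; exact hx hkP
      simp [List.count_append, hne]
    unfold pvG
    rw [pvSet_ofList_append_not_mem P x hx, List.map_append, List.map_congr_left hagree,
      List.sum_append]
    have hcx : (((P ++ [x]).count x : Int)) = 1 := by
      simp [List.count_append, hc0]
    have h1 : pvC2 1 = 0 := by decide
    simp [hc0, h1]

-- A's counting loop, characterised: starting from d = counter P it adds the number of
-- equal pairs contributed by the new prefixes, measured by pvG
theorem pvLoopA (l : List Int) : ∀ (P : List Int) (s cnt : Int),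
    (l.foldl pvStepA (s, PySem.Dict.counter P, cnt)).2.2
      = cnt + pvG (P ++ pvPrefixes s l) - pvG P := by
  induction l with
  | nil => intro P s cnt; simp [pvPrefixes]
  | cons x l ih =>
    intro P s cnt
    have hstep : pvStepA (s, PySem.Dict.counter P, cnt) x
        = (s + x, PySem.Dict.counter (P ++ [s + x]), cnt + P.count (s + x)) := by
      unfold pvStepA
      simp only [PySem.Dict.contains_counter, PySem.Dict.getD_counter]
      by_cases hmem : (s + x) ∈ P
      · simp [hmem, PySem.Dict.counter_append_singleton]
      · have hcf : (PySem.Dict.counter P).contains (s + x) = false := by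
          simp [PySem.Dict.contains_counter]; exact hmem
        have hc0 : P.count (s + x) = 0 := List.count_eq_zero.mpr hmem
        rw [PySem.Dict.counter_append_singleton]
        simp [hmem, hc0, PySem.Dict.modify, PySem.Dict.getD_of_not_contains _ _ hcf]
    rw [List.foldl_cons, hstep, ih (P ++ [s + x]) (s + x) (cnt + P.count (s + x))]
    have := pvG_append P (s + x)
    simp only [pvPrefixes, List.append_assoc, List.cons_append, List.nil_append] at *
    omega

-- B's prefix-building loop appends exactly pvPrefixes
theorem pvPrefixFoldl (l : List Int) : ∀ (acc : List Int) (s : Int),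
    (l.foldl (fun (p : List Int × Int) x => (p.1 ++ [p.2 + x], p.2 + x)) (acc, s)).1
      = acc ++ pvPrefixes s l := by
  induction l with
  | nil => intro acc s; simp [pvPrefixes]
  | cons x l ih =>
    intro acc s
    simp only [List.foldl_cons, ih, pvPrefixes, List.append_assoc, List.cons_append,
      List.nil_append]

-- B's value is pvG of its prefix list
theorem pvAltEq (arr : List String) :
    countBalanced_alt arr
      = pvG ([0] ++ pvPrefixes 0 (arr.foldl (fun ns i => ns ++ [pvScoreB i]) [])) := by
  simp only [countBalanced_alt, pvPrefixFoldl, PySem.Dict.foldl_insert_getD_add_one_eq_counter,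
    PySem.List.foldl_add, pvG, pvC2]
  simp [PySem.Dict.values, PySem.Dict.items_counter, Function.comp_def]

-- ===== VERDICT (by name: the statement is the Claim_ definition above) =====
theorem countBalanced_spec : Claim_equal_countBalanced := by
  intro arr _
  unfold Spec_countBalanced
  rw [pvAltEq]
  have hinit : PySem.Dict.ofList [((0 : Int), (1 : Int))] = PySem.Dict.counter [(0 : Int)] := by
    decide
  simp only [countBalanced, hinit, pvLoopA]
  have hnums : (arr.foldl (fun ns i => ns ++ [pvScoreB i]) [])
      = (arr.foldl (fun ns i => ns ++ [pvScoreA i]) []) := rfl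
  have hg0 : pvG [0] = 0 := by decide
  rw [hnums]
  omega
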